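-- pv_equiv track=rewrite | github.com/paulm17/mlx-rs | scripts/generate_python.py | has_runaway_repeat
-- ===== SOURCE A (Python) =====
-- def has_runaway_repeat(generated_tokens):
--     for w in (16, 24, 32):
--         if len(generated_tokens) < w * 3:
--             continue
--         n = len(generated_tokens)
--         a = generated_tokens[n - w : n]
--         b = generated_tokens[n - 2 * w : n - w]
--         c = generated_tokens[n - 3 * w : n - 2 * w]
--         if a == b and b == c:
--             return True
--     return False
-- ===== SOURCE B (Python) =====
-- def has_runaway_repeat(generated_tokens):
--     tail = generated_tokens[::-1]
--     n = len(tail)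
--     return any(
--         3 * w <= n and all(tail[i] == tail[i + w] for i in range(2 * w))
--         for w in (16, 24, 32)
--     )
-- ===== Notes on version B (the rewrite author's own statement) =====
-- stated objective: alternative
-- what changed: B reverses the list once and detects period-w repetition elementwise with any/all over indices, instead of A's early-return loop slicing and comparing three whole windows.
import Mathlib
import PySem

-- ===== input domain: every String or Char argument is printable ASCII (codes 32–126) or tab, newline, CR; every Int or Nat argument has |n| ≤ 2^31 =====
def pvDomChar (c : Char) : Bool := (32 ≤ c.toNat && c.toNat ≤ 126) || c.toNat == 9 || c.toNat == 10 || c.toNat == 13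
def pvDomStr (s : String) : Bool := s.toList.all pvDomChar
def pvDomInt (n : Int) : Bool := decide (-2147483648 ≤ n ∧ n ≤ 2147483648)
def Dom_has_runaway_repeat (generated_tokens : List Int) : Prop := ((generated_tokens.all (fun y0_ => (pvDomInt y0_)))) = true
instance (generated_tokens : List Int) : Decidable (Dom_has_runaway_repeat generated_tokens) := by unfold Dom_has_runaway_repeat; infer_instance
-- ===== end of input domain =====

-- B replaces A's early-return loop that slices and compares three whole windows by a single
-- reversal plus an elementwise any/all period check; objective: alternative (same cost).

-- ===== PORT A =====
-- loop 'for w in (16, 24, 32)' with early return, transliterated as structural recursion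
def hrrA_loop (generated_tokens : List Int) : List Int → Bool
  | [] => false
  | w :: ws =>
    if ((generated_tokens.length : Int) < w * 3) then hrrA_loop generated_tokens ws
    else
      let n : Int := generated_tokens.length
      let a := PySem.List.slice generated_tokens (some (n - w)) (some n)
      let b := PySem.List.slice generated_tokens (some (n - 2 * w)) (some (n - w))
      let c := PySem.List.slice generated_tokens (some (n - 3 * w)) (some (n - 2 * w))
      if a == b && b == c then true else hrrA_loop generated_tokens ws

def has_runaway_repeat (generated_tokens : List Int) : Bool :=
  hrrA_loop generated_tokens [16, 24, 32]

-- ===== PORT B =====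
-- all(tail[i] == tail[i+w] for i in range(2*w)); indices are in range whenever 3*w <= len(tail)
def hrrB_period (tail : List Int) (w : Int) : Bool :=
  (PySem.List.pyRange 0 (2 * w) 1).all
    (fun i => PySem.List.pyGet? tail i == PySem.List.pyGet? tail (i + w))

def has_runaway_repeat_alt (generated_tokens : List Int) : Bool :=
  let tail := generated_tokens.reverse   -- generated_tokens[::-1]
  let n := tail.length
  [(16 : Int), 24, 32].any (fun w => decide (3 * w ≤ (n : Int)) && hrrB_period tail w)

-- ===== PRECONDITION & SPEC =====
def Spec_has_runaway_repeat (generated_tokens : List Int) (out : Bool) : Prop := out = has_runaway_repeat_alt generated_tokens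
instance (generated_tokens : List Int) (out : Bool) : Decidable (Spec_has_runaway_repeat generated_tokens out) := by unfold Spec_has_runaway_repeat; infer_instance

-- ===== CLAIM (what is proved, stated in full; the proofs are below) =====
def Claim_equal_has_runaway_repeat : Prop := ∀ (generated_tokens : List Int), Dom_has_runaway_repeat generated_tokens → Spec_has_runaway_repeat generated_tokens (has_runaway_repeat generated_tokens)

-- ===== LEMMAS AND PROOFS =====

-- one step of A's loop as a disjunct
theorem hrrA_loop_cons (xs : List Int) (w : Int) (ws : List Int) :
    hrrA_loop xs (w :: ws) =
      (((!decide ((xs.length : Int) < w * 3)) &&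
        ((PySem.List.slice xs (some ((xs.length : Int) - w)) (some (xs.length : Int)) ==
          PySem.List.slice xs (some ((xs.length : Int) - 2 * w)) (some ((xs.length : Int) - w))) &&
         (PySem.List.slice xs (some ((xs.length : Int) - 2 * w)) (some ((xs.length : Int) - w)) ==
          PySem.List.slice xs (some ((xs.length : Int) - 3 * w)) (some ((xs.length : Int) - 2 * w)))))
       || hrrA_loop xs ws) := by
  show (if ((xs.length : Int) < w * 3) then hrrA_loop xs ws else _) = _
  split_ifs with hg
  · simp [hg]
  · simp only [decide_eq_false hg, Bool.not_false, Bool.true_and]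
    split_ifs with he <;> simp [he]

-- equality of two equal-length segments, elementwise
theorem seg_eq_iff (xs : List Int) (d1 d2 w : Nat)
    (_h1 : d1 + w ≤ xs.length) (_h2 : d2 + w ≤ xs.length) :
    (List.take w (List.drop d1 xs) = List.take w (List.drop d2 xs)) ↔
      ∀ j, j < w → xs[d1 + j]? = xs[d2 + j]? := by
  constructor
  · intro h j hj
    have := congrArg (fun l => l[j]?) h
    simpa [List.getElem?_take, List.getElem?_drop, hj] using this
  · intro h
    apply List.ext_getElem?
    intro i
    simp only [List.getElem?_take, List.getElem?_drop]
    split_ifs with hi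
    · exact h i hi
    · rfl

-- B's elementwise check, as a statement about xs itself
theorem period_iff (xs : List Int) (w : Nat) (h : 3 * w ≤ xs.length) :
    hrrB_period xs.reverse (w : Int) = true ↔
      ∀ i, i < 2 * w → xs[xs.length - 1 - i]? = xs[xs.length - 1 - (i + w)]? := by
  unfold hrrB_period
  rw [List.all_eq_true]
  constructor
  · intro h' i hi
    have hm : ((i : Nat) : Int) ∈ PySem.List.pyRange 0 (2 * (w : Int)) 1 := by
      rw [PySem.List.mem_pyRange_one]; constructor <;> [positivity; exact_mod_cast (by omega : (i:Int) < 2*w)]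
    have hx := h' _ hm
    have ecast : ((i : Nat) : Int) + (w : Int) = ((i + w : Nat) : Int) := by push_cast; ring
    rw [ecast, PySem.List.pyGet?_natCast, PySem.List.pyGet?_natCast, beq_iff_eq] at hx
    rw [List.getElem?_reverse (by omega), List.getElem?_reverse (by omega)] at hx
    exact hx
  · intro h' x hx
    rw [PySem.List.mem_pyRange_one] at hx
    obtain ⟨hx0, hx2⟩ := hx
    obtain ⟨i, rfl⟩ : ∃ i : Nat, ((i : Nat) : Int) = x := ⟨x.toNat, by omega⟩
    have hi : i < 2 * w := by exact_mod_cast (by omega : (i : Int) < 2 * w)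
    have hx := h' i hi
    have ecast : ((i : Nat) : Int) + (w : Int) = ((i + w : Nat) : Int) := by push_cast; ring
    rw [ecast, PySem.List.pyGet?_natCast, PySem.List.pyGet?_natCast, beq_iff_eq]
    rw [List.getElem?_reverse (by omega), List.getElem?_reverse (by omega)]
    exact hx

-- index juggling: the two window equalities together are exactly period-w on the tail
theorem windows_iff (xs : List Int) (w : Nat) (hw : 0 < w) (h : 3 * w ≤ xs.length) :
    ((∀ j, j < w → xs[xs.length - w + j]? = xs[xs.length - 2 * w + j]?) ∧
     (∀ j, j < w → xs[xs.length - 2 * w + j]? = xs[xs.length - 3 * w + j]?)) ↔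
      (∀ i, i < 2 * w → xs[xs.length - 1 - i]? = xs[xs.length - 1 - (i + w)]?) := by
  set n := xs.length with hn
  constructor
  · rintro ⟨h1, h2⟩ i hi
    by_cases hiw : i < w
    · have hx := h1 (w - 1 - i) (by omega)
      rw [show n - w + (w - 1 - i) = n - 1 - i by omega,
          show n - 2 * w + (w - 1 - i) = n - 1 - (i + w) by omega] at hx
      exact hx
    · have hx := h2 (2 * w - 1 - i) (by omega)
      rw [show n - 2 * w + (2 * w - 1 - i) = n - 1 - i by omega,
          show n - 3 * w + (2 * w - 1 - i) = n - 1 - (i + w) by omega] at hx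
      exact hx
  · intro hp
    constructor
    · intro j hj
      have hx := hp (w - 1 - j) (by omega)
      rw [show n - 1 - (w - 1 - j) = n - w + j by omega,
          show n - 1 - ((w - 1 - j) + w) = n - 2 * w + j by omega] at hx
      exact hx
    · intro j hj
      have hx := hp (2 * w - 1 - j) (by omega)
      rw [show n - 1 - (2 * w - 1 - j) = n - 2 * w + j by omega,
          show n - 1 - ((2 * w - 1 - j) + w) = n - 3 * w + j by omega] at hx
      exact hx

-- one window size: A's guarded triple-window test equals B's guarded period test
theorem cond_eq (xs : List Int) (w : Nat) (hw : 0 < w) :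
    ((!decide ((xs.length : Int) < (w : Int) * 3)) &&
      ((PySem.List.slice xs (some ((xs.length : Int) - (w : Int))) (some (xs.length : Int)) ==
        PySem.List.slice xs (some ((xs.length : Int) - 2 * (w : Int))) (some ((xs.length : Int) - (w : Int)))) &&
       (PySem.List.slice xs (some ((xs.length : Int) - 2 * (w : Int))) (some ((xs.length : Int) - (w : Int))) ==
        PySem.List.slice xs (some ((xs.length : Int) - 3 * (w : Int))) (some ((xs.length : Int) - 2 * (w : Int))))))
    = (decide (3 * (w : Int) ≤ ((xs.reverse.length : Nat) : Int)) && hrrB_period xs.reverse (w : Int)) := by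
  have hlen : xs.reverse.length = xs.length := List.length_reverse
  rw [hlen]
  by_cases hg : 3 * w ≤ xs.length
  · have hgi : ¬ ((xs.length : Int) < (w : Int) * 3) := by omega
    have hgi' : 3 * (w : Int) ≤ (xs.length : Int) := by exact_mod_cast hg
    rw [decide_eq_false hgi, decide_eq_true hgi']
    simp only [Bool.not_false, Bool.true_and]
    -- rewrite the three slices as take/drop segments
    rw [PySem.List.slice_toNat xs (by omega) (by omega),
        PySem.List.slice_toNat xs (by omega) (by omega),
        PySem.List.slice_toNat xs (by omega) (by omega)]
    rw [show ((xs.length : Int) - (w : Int)).toNat = xs.length - w by omega,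
        show ((xs.length : Int) - 2 * (w : Int)).toNat = xs.length - 2 * w by omega,
        show ((xs.length : Int) - 3 * (w : Int)).toNat = xs.length - 3 * w by omega,
        show ((xs.length : Int)).toNat = xs.length by omega]
    rw [show xs.length - (xs.length - w) = w by omega,
        show xs.length - w - (xs.length - 2 * w) = w by omega,
        show xs.length - 2 * w - (xs.length - 3 * w) = w by omega]
    by_cases hb : hrrB_period xs.reverse (w : Int) = true
    · rw [hb]
      have hper := (period_iff xs w hg).mp hb
      obtain ⟨hab, hbc⟩ := (windows_iff xs w hw hg).mpr hper
      rw [beq_iff_eq.mpr ((seg_eq_iff xs _ _ w (by omega) (by omega)).mpr hab),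
          beq_iff_eq.mpr ((seg_eq_iff xs _ _ w (by omega) (by omega)).mpr hbc)]
      rfl
    · rw [Bool.not_eq_true] at hb
      rw [hb, Bool.and_eq_false_iff]
      by_contra hcon
      rw [not_or] at hcon
      obtain ⟨hab, hbc⟩ := hcon
      rw [Bool.not_eq_false, beq_iff_eq] at hab hbc
      have hper : ∀ i, i < 2 * w → xs[xs.length - 1 - i]? = xs[xs.length - 1 - (i + w)]? :=
        (windows_iff xs w hw hg).mp
          ⟨(seg_eq_iff xs _ _ w (by omega) (by omega)).mp hab,
           (seg_eq_iff xs _ _ w (by omega) (by omega)).mp hbc⟩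
      rw [← period_iff xs w hg] at hper
      simp [hb] at hper
  · have hgi : (xs.length : Int) < (w : Int) * 3 := by omega
    have hgi' : ¬ (3 * (w : Int) ≤ (xs.length : Int)) := by omega
    rw [decide_eq_true hgi, decide_eq_false hgi']
    simp

-- ===== VERDICT (by name: the statement is the Claim_ definition above) =====
theorem has_runaway_repeat_spec : Claim_equal_has_runaway_repeat := by
  intro xs _
  unfold Spec_has_runaway_repeat has_runaway_repeat has_runaway_repeat_alt
  rw [hrrA_loop_cons, hrrA_loop_cons, hrrA_loop_cons]
  show _ = [(16 : Int), 24, 32].any _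
  simp only [List.any_cons, List.any_nil, Bool.or_false]
  rw [show hrrA_loop xs [] = false from rfl, Bool.or_false]
  rw [show ((16 : Int)) = ((16 : Nat) : Int) by norm_num,
      show ((24 : Int)) = ((24 : Nat) : Int) by norm_num,
      show ((32 : Int)) = ((32 : Nat) : Int) by norm_num]
  rw [cond_eq xs 16 (by norm_num), cond_eq xs 24 (by norm_num), cond_eq xs 32 (by norm_num)]
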